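-- pv_equiv track=rewrite | github.com/santhank8/paperclone | orchestrator/src/nodes/infra_lead.py | select_deploy_workflows
-- ===== SOURCE A (Python) =====
-- WORKFORCE_PREFIX = "agent-workforce/"
--
-- SERVICES_PREFIX = "services/"
--
-- FRONTEND_PREFIX = "frontend/"
--
-- def select_deploy_workflows(changed_files: list[str]) -> list[str]:
--     """Select which VPS deploy workflows to trigger based on changed files.
--
--     Rules:
--     - agent-workforce/** → vps-deploy-workforce.yml
--     - services/** → vps-deploy-app.yml
--     - frontend/** → vps-deploy-app.yml (frontend is deployed with app services)
--     - Mixed → both workflows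
--     """
--     has_workforce = any(
--         p.startswith(WORKFORCE_PREFIX) for p in changed_files
--     )
--     has_app = any(
--         p.startswith(SERVICES_PREFIX) or p.startswith(FRONTEND_PREFIX)
--         for p in changed_files
--     )
--
--     workflows: list[str] = []
--     if has_workforce:
--         workflows.append("vps-deploy-workforce.yml")
--     if has_app:
--         workflows.append("vps-deploy-app.yml")
--     return workflows
-- ===== SOURCE B (Python) =====
-- _RULES = [
--     ("agent-workforce/", "vps-deploy-workforce.yml"),
--     ("services/", "vps-deploy-app.yml"),
--     ("frontend/", "vps-deploy-app.yml"),
-- ]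
-- _ORDER = ["vps-deploy-workforce.yml", "vps-deploy-app.yml"]
--
-- def select_deploy_workflows(changed_files):
--     triggered = set()
--     for p in changed_files:
--         for prefix, wf in _RULES:
--             if p.startswith(prefix):
--                 triggered.add(wf)
--     return [wf for wf in _ORDER if wf in triggered]
-- ===== Notes on version B (the rewrite author's own statement) =====
-- stated objective: alternative
-- what changed: Replaces per-workflow boolean flags set by two any() scans with a data-driven rule table: each file is classified against the prefix->workflow rules into a set of triggered workflows, and the output is the canonical workflow order filtered by set membership.
import Mathlib
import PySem

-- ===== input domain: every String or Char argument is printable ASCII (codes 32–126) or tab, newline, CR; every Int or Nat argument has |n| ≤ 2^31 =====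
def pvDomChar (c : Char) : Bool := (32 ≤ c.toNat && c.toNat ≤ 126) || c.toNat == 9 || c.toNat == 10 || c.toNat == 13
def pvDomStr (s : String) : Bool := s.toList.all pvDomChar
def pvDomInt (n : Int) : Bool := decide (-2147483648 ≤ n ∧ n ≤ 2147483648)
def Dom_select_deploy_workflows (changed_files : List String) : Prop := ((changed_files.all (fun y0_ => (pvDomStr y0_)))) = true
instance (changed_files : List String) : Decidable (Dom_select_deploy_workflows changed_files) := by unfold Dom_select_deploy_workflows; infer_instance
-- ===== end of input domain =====

-- B replaces A's per-workflow any() flag scans with a data-driven prefix->workflow rule table: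
-- each file is classified into a set of triggered workflows, output = canonical order filtered by membership (objective: alternative).

-- ===== PORT A =====
def select_deploy_workflows (changed_files : List String) : List String :=
  let has_workforce := changed_files.any (fun p => PySem.Str.startswith p "agent-workforce/")
  let has_app := changed_files.any
    (fun p => PySem.Str.startswith p "services/" || PySem.Str.startswith p "frontend/")
  let workflows : List String := []
  let workflows := if has_workforce then workflows ++ ["vps-deploy-workforce.yml"] else workflows
  let workflows := if has_app then workflows ++ ["vps-deploy-app.yml"] else workflows
  workflows

-- ===== PORT B =====
def sdw_rules : List (String × String) :=
  [("agent-workforce/", "vps-deploy-workforce.yml"),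
   ("services/", "vps-deploy-app.yml"),
   ("frontend/", "vps-deploy-app.yml")]

def sdw_order : List String := ["vps-deploy-workforce.yml", "vps-deploy-app.yml"]

def select_deploy_workflows_alt (changed_files : List String) : List String :=
  let triggered : PySem.Set String :=
    changed_files.foldl (fun trig p =>
      sdw_rules.foldl (fun trig r =>
        if PySem.Str.startswith p r.1 then PySem.Set.add trig r.2 else trig) trig)
      PySem.Set.empty
  sdw_order.filter (fun wf => PySem.Set.contains triggered wf)

-- ===== PRECONDITION & SPEC =====
def Spec_select_deploy_workflows (changed_files : List String) (out : List String) : Prop := out = select_deploy_workflows_alt changed_files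
instance (changed_files : List String) (out : List String) : Decidable (Spec_select_deploy_workflows changed_files out) := by unfold Spec_select_deploy_workflows; infer_instance

-- ===== CLAIM =====
def Claim_equal_select_deploy_workflows : Prop := ∀ (changed_files : List String), Dom_select_deploy_workflows changed_files → Spec_select_deploy_workflows changed_files (select_deploy_workflows changed_files)

-- ===== LEMMAS AND PROOFS =====

-- one file classified against the rule table: what it adds to the triggered set
set_option maxHeartbeats 1000000 in
theorem sdw_mem_step (trig : PySem.Set String) (p wf : String) :
    (wf ∈ sdw_rules.foldl (fun trig r =>
        if PySem.Str.startswith p r.1 then PySem.Set.add trig r.2 else trig) trig)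
    ↔ wf ∈ trig
      ∨ (wf = "vps-deploy-workforce.yml" ∧ PySem.Str.startswith p "agent-workforce/" = true)
      ∨ (wf = "vps-deploy-app.yml" ∧ (PySem.Str.startswith p "services/" = true ∨ PySem.Str.startswith p "frontend/" = true)) := by
  simp only [sdw_rules, List.foldl]
  split_ifs with h1 h2 h3 h3 h2 h3 h3 <;>
    simp only [PySem.Set.mem_add, h1, h2, h3] <;> aesop

-- membership in the accumulated set of triggered workflows, characterised by the two any-predicates
set_option maxHeartbeats 1000000 in
theorem sdw_mem_fold (l : List String) (trig : PySem.Set String) (wf : String) :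
    (wf ∈ l.foldl (fun trig p =>
        sdw_rules.foldl (fun trig r =>
          if PySem.Str.startswith p r.1 then PySem.Set.add trig r.2 else trig) trig) trig)
    ↔ wf ∈ trig
      ∨ (wf = "vps-deploy-workforce.yml" ∧ l.any (fun p => PySem.Str.startswith p "agent-workforce/"))
      ∨ (wf = "vps-deploy-app.yml" ∧ l.any (fun p => PySem.Str.startswith p "services/" || PySem.Str.startswith p "frontend/")) := by
  induction l generalizing trig with
  | nil => simp
  | cons p rest ih =>
    rw [List.foldl_cons, ih, sdw_mem_step]
    simp only [List.any_cons, Bool.or_eq_true]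
    aesop

-- ===== VERDICT =====
theorem select_deploy_workflows_spec : Claim_equal_select_deploy_workflows := by
  intro changed_files _
  unfold Spec_select_deploy_workflows select_deploy_workflows select_deploy_workflows_alt
  simp only [sdw_order, List.filter]
  rw [show ∀ s : PySem.Set String, ∀ w, PySem.Set.contains s w = decide (w ∈ s) from
    fun s w => by simp [PySem.Set.contains_eq_listContains]]
  rw [show ∀ s : PySem.Set String, ∀ w, PySem.Set.contains s w = decide (w ∈ s) from
    fun s w => by simp [PySem.Set.contains_eq_listContains]]
  simp only [sdw_mem_fold]
  cases hw : changed_files.any (fun p => PySem.Str.startswith p "agent-workforce/") <;>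
  cases ha : changed_files.any (fun p => PySem.Str.startswith p "services/" || PySem.Str.startswith p "frontend/") <;>
    simp [PySem.Set.empty]
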